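-- pv_equiv track=rewrite | github.com/priimak/HaasoscopeProPy | src/hspro_api/utils.py | find_longest_zero_stretch
-- ===== SOURCE A (Python) =====
-- def find_longest_zero_stretch(arr: list[int], wrap: bool) -> tuple[int, int]:
--     if wrap: arr = arr + arr  # to handle wraparounds
--     max_length = 0
--     current_length = 0
--     start_index = -1
--     current_start = -1
--     for i, num in enumerate(arr):
--         if num == 0:
--             if current_length == 0:
--                 current_start = i
--             current_length += 1
--             if current_length > max_length:
--                 max_length = current_length
--                 start_index = current_start
--         else:
--             current_length = 0
--     return start_index, max_length
-- ===== SOURCE B (Python) =====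
-- def find_longest_zero_stretch(arr: list[int], wrap: bool) -> tuple[int, int]:
--     if wrap:
--         arr = arr + arr  # to handle wraparounds
--     best_start, best_len = -1, 0
--     i, n = 0, len(arr)
--     while i < n:
--         if arr[i] != 0:
--             i += 1
--         else:
--             j = i
--             while j < n and arr[j] == 0:
--                 j += 1
--             if j - i > best_len:
--                 best_start, best_len = i, j - i
--             i = j
--     return best_start, best_len
-- ===== Notes on version B (the rewrite author's own statement) =====
-- stated objective: alternative
-- what changed: Replaces A's per-element state machine (current_length/current_start/max updated at every element) with a run-based two-pointer scan: skip non-zeros, measure each maximal zero run in one inner sweep, and update the best (strictly, so the first longest run wins) once per run.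
import Mathlib
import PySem

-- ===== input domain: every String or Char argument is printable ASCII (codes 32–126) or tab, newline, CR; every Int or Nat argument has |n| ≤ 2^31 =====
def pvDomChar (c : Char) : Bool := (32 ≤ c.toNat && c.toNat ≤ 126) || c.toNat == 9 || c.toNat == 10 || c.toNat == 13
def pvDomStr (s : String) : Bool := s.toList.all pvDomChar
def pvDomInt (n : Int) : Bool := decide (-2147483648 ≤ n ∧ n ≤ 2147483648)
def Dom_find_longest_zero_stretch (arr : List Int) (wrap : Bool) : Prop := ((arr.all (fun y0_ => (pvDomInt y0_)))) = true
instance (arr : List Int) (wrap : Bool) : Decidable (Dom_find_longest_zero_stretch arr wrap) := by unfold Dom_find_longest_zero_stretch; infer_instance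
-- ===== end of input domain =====

-- B replaces A's per-element state machine by a run-based two-pointer scan
-- (skip non-zeros, measure each maximal zero run, update the best once per run);
-- same complexity, alternative decomposition.


-- ===== PORT A =====
-- the for-loop over enumerate(arr) with state (max_length, current_length, start_index, current_start)
def goA_find : List Int → Int → Int × Int × Int × Int → Int × Int × Int × Int
  | [], _, st => st
  | num :: rest, i, (maxL, curL, startI, curS) =>
    if num = 0 then
      let curS' := if curL = 0 then i else curS
      let curL' := curL + 1
      if curL' > maxL then goA_find rest (i + 1) (curL', curL', curS', curS')
      else goA_find rest (i + 1) (maxL, curL', startI, curS')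
    else goA_find rest (i + 1) (maxL, 0, startI, curS)

def find_longest_zero_stretch (arr : List Int) (wrap : Bool) : Int × Int :=
  let arr := if wrap then arr ++ arr else arr
  let st := goA_find arr 0 (0, 0, -1, -1)
  (st.2.2.1, st.1)

-- ===== PORT B =====
-- the outer while-loop: skip a non-zero, or consume the whole zero run
-- (the inner `while j < n and arr[j] == 0` sweep is the takeWhile prefix)
def goB_find : List Int → Int → Int × Int → Int × Int
  | [], _, best => best
  | x :: t, i, best =>
    if x ≠ 0 then goB_find t (i + 1) best
    else
      let k : Int := (((x :: t).takeWhile (· == 0)).length : Int)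
      goB_find ((x :: t).dropWhile (· == 0)) (i + k)
        (if k > best.2 then (i, k) else best)
termination_by xs => xs.length
decreasing_by
  · simp
  · have hx : x = 0 := by omega
    simp [hx]
    exact List.length_dropWhile_le _ _

def find_longest_zero_stretch_alt (arr : List Int) (wrap : Bool) : Int × Int :=
  let arr := if wrap then arr ++ arr else arr
  goB_find arr 0 (-1, 0)

-- ===== PRECONDITION & SPEC =====
def Spec_find_longest_zero_stretch (arr : List Int) (wrap : Bool) (out : Int × Int) : Prop := out = find_longest_zero_stretch_alt arr wrap
instance (arr : List Int) (wrap : Bool) (out : Int × Int) : Decidable (Spec_find_longest_zero_stretch arr wrap out) := by unfold Spec_find_longest_zero_stretch; infer_instance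

-- ===== CLAIM (what is proved, stated in full; the proofs are below) =====
def Claim_equal_find_longest_zero_stretch : Prop := ∀ (arr : List Int) (wrap : Bool), Dom_find_longest_zero_stretch arr wrap → Spec_find_longest_zero_stretch arr wrap (find_longest_zero_stretch arr wrap)

-- ===== LEMMAS AND PROOFS =====

-- "update the best with run r, strict > so the first longest run wins"
def updR (b r : Int × Int) : Int × Int := if r.2 > b.2 then r else b

-- proof-side list of (start, length) of the maximal zero runs of xs, indices starting at i
def zrunsP : List Int → Int → List (Int × Int)
  | [], _ => []
  | x :: t, i =>
    if x = 0 then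
      (i, (((x :: t).takeWhile (· == 0)).length : Int)) ::
        zrunsP ((x :: t).dropWhile (· == 0)) (i + (((x :: t).takeWhile (· == 0)).length : Int))
    else zrunsP t (i + 1)
termination_by xs => xs.length
decreasing_by
  · simp [‹x = 0›]
    exact List.length_dropWhile_le _ _
  · simp

lemma dropWhile_head_false {α : Type} (p : α → Bool) :
    ∀ (l : List α) (y : α) (ys : List α), l.dropWhile p = y :: ys → p y = false := by
  intro l
  induction l with
  | nil => intro y ys h; simp at h
  | cons a t ih =>
    intro y ys h
    by_cases hp : p a
    · simp [hp] at h; exact ih y ys h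
    · simp [hp] at h
      rcases h with ⟨h1, _⟩
      rw [← h1]; exact Bool.of_not_eq_true hp

lemma goB_eq_fold : ∀ (n : Nat) (xs : List Int), xs.length ≤ n → ∀ (i : Int) (b : Int × Int),
    goB_find xs i b = (zrunsP xs i).foldl updR b := by
  intro n
  induction n with
  | zero =>
    intro xs h i b
    have : xs = [] := List.eq_nil_of_length_eq_zero (Nat.le_zero.mp h)
    subst this; simp [goB_find, zrunsP]
  | succ n ih =>
    intro xs h i b
    cases xs with
    | nil => simp [goB_find, zrunsP]
    | cons x t =>
      by_cases hx : x = 0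
      · subst hx
        have hlen : (t.dropWhile (· == 0)).length ≤ n := by
          have h1 := List.length_dropWhile_le (fun x => x == (0:Int)) t
          simp at h
          omega
        rw [goB_find, zrunsP]
        norm_num
        rw [ih _ hlen]
        congr 1
        simp only [updR]
        split_ifs <;> first | rfl | omega
      · rw [goB_find, zrunsP]
        simp only [if_pos hx, if_neg hx]
        exact ih t (by simp at h; omega) (i + 1) b

-- processing a block of zeros mid-run: run started at s, k ≥ 1 zeros already seen
lemma goA_zeros : ∀ (t : List Int), (∀ x ∈ t, x = 0) → ∀ (rest : List Int) (i k s S0 M0 : Int),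
    1 ≤ k → 0 ≤ M0 → s = i - k →
    goA_find (t ++ rest) i ((updR (S0, M0) (s, k)).2, k, (updR (S0, M0) (s, k)).1, s)
      = goA_find rest (i + t.length) ((updR (S0, M0) (s, k + t.length)).2, k + t.length,
          (updR (S0, M0) (s, k + t.length)).1, s) := by
  intro t
  induction t with
  | nil => intro _ rest i k s S0 M0 hk hM hs; simp
  | cons x t ih =>
    intro hz rest i k s S0 M0 hk hM hs
    have hx : x = 0 := hz x (List.mem_cons_self ..)
    subst hx
    rw [List.cons_append, goA_find]
    simp only [if_pos rfl, if_neg (by omega : ¬ k = 0)]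
    have hstate : (if k + 1 > (updR (S0, M0) (s, k)).2 then goA_find (t ++ rest) (i + 1) (k + 1, k + 1, s, s)
        else goA_find (t ++ rest) (i + 1) ((updR (S0, M0) (s, k)).2, k + 1, (updR (S0, M0) (s, k)).1, s))
        = goA_find (t ++ rest) (i + 1) ((updR (S0, M0) (s, k + 1)).2, k + 1, (updR (S0, M0) (s, k + 1)).1, s) := by
      simp only [updR]
      by_cases h1 : k > M0 <;> by_cases h2 : k + 1 > M0 <;>
        simp [h1, h2] <;> first | rfl | omega
    rw [if_pos trivial, hstate]
    rw [ih (fun y hy => hz y (List.mem_cons_of_mem _ hy)) rest (i + 1) (k + 1) s S0 M0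
      (by omega) hM (by omega)]
    have e1 : i + 1 + (t.length : Int) = i + (((0:Int) :: t).length : Int) := by simp only [List.length_cons]; push_cast; ring
    have e2 : k + 1 + (t.length : Int) = k + (((0:Int) :: t).length : Int) := by simp only [List.length_cons]; push_cast; ring
    rw [e1, e2]

lemma goA_eq_fold : ∀ (n : Nat) (xs : List Int), xs.length ≤ n →
    ∀ (i S0 M0 cs : Int), 0 ≤ M0 →
    ((goA_find xs i (M0, 0, S0, cs)).2.2.1, (goA_find xs i (M0, 0, S0, cs)).1)
      = (zrunsP xs i).foldl updR (S0, M0) := by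
  intro n
  induction n with
  | zero =>
    intro xs h i S0 M0 cs hM
    have : xs = [] := List.eq_nil_of_length_eq_zero (Nat.le_zero.mp h)
    subst this; simp [goA_find, zrunsP]
  | succ n ih =>
    intro xs h i S0 M0 cs hM
    cases xs with
    | nil => simp [goA_find, zrunsP]
    | cons x t =>
      by_cases hx : x = 0
      · subst hx
        rw [goA_find]
        norm_num
        have hstate1 : (if M0 < 1 then goA_find t (i + 1) (1, 1, i, i)
            else goA_find t (i + 1) (M0, 1, S0, i))
            = goA_find t (i + 1) ((updR (S0, M0) (i, 1)).2, 1, (updR (S0, M0) (i, 1)).1, i) := by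
          simp only [updR]
          by_cases h1 : (1:Int) > M0 <;> simp [h1] <;> first | rfl | omega
        have hz' : ∀ y ∈ t.takeWhile (fun v => v == (0:Int)), y = 0 := by
          intro y hy
          simpa using List.mem_takeWhile_imp hy
        have hblk := goA_zeros (t.takeWhile (fun v => v == (0:Int))) hz'
          (t.dropWhile (fun v => v == (0:Int))) (i + 1) 1 i S0 M0 (by omega) hM (by omega)
        rw [List.takeWhile_append_dropWhile] at hblk
        rw [zrunsP]
        norm_num
        cases hdw : t.dropWhile (fun v => v == (0:Int)) with
        | nil =>
          rw [hdw] at hblk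
          rw [hstate1, hblk]
          have e3 : (1:Int) + ((t.takeWhile (fun v => v == (0:Int))).length : Int)
              = ((t.takeWhile (fun v => v == (0:Int))).length : Int) + 1 := by ring
          simp [goA_find, zrunsP, updR, e3]
        | cons y ys =>
          have hy : y ≠ 0 := by
            have := dropWhile_head_false (fun v => v == (0:Int)) t y ys hdw
            simpa using this
          rw [hdw] at hblk
          rw [hstate1, hblk, goA_find, if_neg hy, zrunsP, if_neg hy]
          have hlen : ys.length ≤ n := by
            have h1 := List.length_dropWhile_le (fun v => v == (0:Int)) t
            rw [hdw] at h1
            simp at h h1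
            omega
          have hM' : 0 ≤ (updR (S0, M0) (i, 1 + ((t.takeWhile (fun v => v == (0:Int))).length : Int))).2 := by
            have := Int.natCast_nonneg (t.takeWhile (fun v => v == (0:Int))).length
            simp only [updR]
            split_ifs <;> simp <;> omega
          have hih := ih ys hlen (i + 1 + ((t.takeWhile (fun v => v == (0:Int))).length : Int) + 1)
            (updR (S0, M0) (i, 1 + ((t.takeWhile (fun v => v == (0:Int))).length : Int))).1
            (updR (S0, M0) (i, 1 + ((t.takeWhile (fun v => v == (0:Int))).length : Int))).2
            i hM'
          rw [hih, Prod.mk.eta]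
          have e4 : updR (S0, M0) (i, ((t.takeWhile (fun v => v == (0:Int))).length : Int) + 1)
              = updR (S0, M0) (i, 1 + ((t.takeWhile (fun v => v == (0:Int))).length : Int)) := by
            have : ((t.takeWhile (fun v => v == (0:Int))).length : Int) + 1
                = 1 + ((t.takeWhile (fun v => v == (0:Int))).length : Int) := by ring
            rw [this]
          have e5 : i + (((t.takeWhile (fun v => v == (0:Int))).length : Int) + 1) + 1
              = i + 1 + ((t.takeWhile (fun v => v == (0:Int))).length : Int) + 1 := by ring
          rw [e4, e5]
      · rw [goA_find, if_neg hx, zrunsP, if_neg hx]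
        exact ih t (by simp at h; omega) (i + 1) S0 M0 cs hM

-- ===== VERDICT (by name: the statement is the Claim_ definition above) =====
theorem find_longest_zero_stretch_spec : Claim_equal_find_longest_zero_stretch := by
  intro arr wrap _
  unfold Spec_find_longest_zero_stretch find_longest_zero_stretch find_longest_zero_stretch_alt
  set L := if wrap then arr ++ arr else arr with hL
  have hA := goA_eq_fold L.length L (le_refl _) 0 (-1) 0 (-1) (by norm_num)
  have hB := goB_eq_fold L.length L (le_refl _) 0 (-1, 0)
  simp only [] at hA hB ⊢
  rw [hA, hB]
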